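-- pv_equiv track=rewrite | github.com/drozdovapb/myBedGtfGffVcfTools | lexicoSV.py | check_for_peculiarities
-- ===== SOURCE A (Python) =====
-- def check_for_peculiarities(list_of_features):
--     """
--     This function takes a list of features (genes and coordinates)
--     and checks whether each contig contains only adjacent genes.
--     If it is not the case it reports the name of the contig.
--     Such contigs may result from either chromosomal rearrangement
--     or assembly / annotation errors.
--     """
--
--     contigs = dict()  # a distionary of contig names and chromosomes
--     strange_contigs = set()  # stores names of contigs with non-adjacent genes
--     for line in list_of_features:
--         contig_name = line[0]
--         chr_letter = line[3][1]
--
--         if contig_name not in contigs:  # fill the dictionary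
--             contigs[contig_name] = chr_letter
--             continue
--
--         # check other genes in the same contig
--         if contigs[contig_name] == chr_letter:  # the contig is ok
--             continue
--
--         strange_contigs.add(contig_name)
--
--     return strange_contigs
-- ===== SOURCE B (Python) =====
-- def check_for_peculiarities(list_of_features):
--     """Brute-force restatement without the contig->first-letter dictionary:
--     a contig is strange exactly when some already-seen gene of the same
--     contig carries a different chromosome letter, so scan the seen lines
--     for such a conflict instead of memoising and comparing a first letter."""
--     strange_contigs = set()
--     seen = []
--     for line in list_of_features:
--         contig_name = line[0]
--         chr_letter = line[3][1]
--         if any(prev[0] == contig_name and prev[3][1] != chr_letter for prev in seen):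
--             strange_contigs.add(contig_name)
--         seen.append(line)
--     return strange_contigs
-- ===== Notes on version B (the rewrite author's own statement) =====
-- stated objective: alternative
-- what changed: B drops A's contig-to-first-letter dictionary and early-continue chain entirely and instead brute-force scans the already-seen lines for an earlier gene of the same contig with a different chromosome letter (pairwise conflict search vs memoised first-letter comparison).
import Mathlib
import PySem

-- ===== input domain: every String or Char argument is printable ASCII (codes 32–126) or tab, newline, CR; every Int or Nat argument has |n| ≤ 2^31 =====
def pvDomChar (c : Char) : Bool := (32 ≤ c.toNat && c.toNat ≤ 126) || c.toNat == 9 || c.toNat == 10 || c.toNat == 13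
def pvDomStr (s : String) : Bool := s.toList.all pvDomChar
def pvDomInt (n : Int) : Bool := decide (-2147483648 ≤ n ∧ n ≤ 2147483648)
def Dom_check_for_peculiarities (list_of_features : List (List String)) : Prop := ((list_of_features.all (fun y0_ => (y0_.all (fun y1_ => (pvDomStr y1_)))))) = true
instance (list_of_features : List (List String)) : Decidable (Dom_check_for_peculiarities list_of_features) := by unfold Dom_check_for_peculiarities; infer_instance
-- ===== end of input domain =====

-- B drops A's contig->first-letter dictionary and instead brute-force scans the
-- already-seen lines for an earlier gene of the same contig with a different
-- chromosome letter (objective: alternative; not faster).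


-- ===== PORT A =====
-- contig_name = line[0]; chr_letter = line[3][1]   (total forms; exact under Pre_)
def pvContig (line : List String) : String := PySem.List.pyGetD line 0 ""
def pvLetter (line : List String) : Char :=
  (PySem.Str.pyGet? (PySem.List.pyGetD line 3 "") 1).getD ' '

-- one iteration of A's for-loop over state (contigs, strange_contigs)
def stepA (st : PySem.Dict String Char × PySem.Set String) (line : List String) :
    PySem.Dict String Char × PySem.Set String :=
  let contig_name := pvContig line
  let chr_letter := pvLetter line
  if st.1.contains contig_name = false then
    (st.1.insert contig_name chr_letter, st.2)
  else if st.1.getD contig_name ' ' == chr_letter then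
    st
  else
    (st.1, PySem.Set.add st.2 contig_name)

def check_for_peculiarities (list_of_features : List (List String)) : List String :=
  (list_of_features.foldl stepA (PySem.Dict.empty, PySem.Set.empty)).2

-- ===== PORT B =====
-- one iteration of B's loop over state (strange_contigs, seen):
-- contig_name = line[0]; chr_letter = line[3][1];
-- if any(prev[0]==contig_name and prev[3][1]!=chr_letter for prev in seen): strange.add(contig_name);
-- seen.append(line)
def stepB (st : List (List String) × PySem.Set String) (line : List String) :
    List (List String) × PySem.Set String :=
  let contig_name := pvContig line
  let chr_letter := pvLetter line
  let strange :=
    if st.1.any (fun prev =>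
        pvContig prev == contig_name && !(pvLetter prev == chr_letter)) then
      PySem.Set.add st.2 contig_name
    else st.2
  (st.1 ++ [line], strange)

def check_for_peculiarities_alt (list_of_features : List (List String)) : List String :=
  (list_of_features.foldl stepB ([], PySem.Set.empty)).2

-- ===== PRECONDITION & SPEC =====
-- A raises IndexError on a line with fewer than 4 fields or whose 4th field has
-- fewer than 2 characters; exactly those inputs are excluded.
def Pre_check_for_peculiarities (list_of_features : List (List String)) : Prop :=
  ∀ line ∈ list_of_features, 4 ≤ line.length ∧ 2 ≤ (line.getD 3 "").toList.length
instance (list_of_features : List (List String)) : Decidable (Pre_check_for_peculiarities list_of_features) := by unfold Pre_check_for_peculiarities; infer_instance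

def pvWitness_check_for_peculiarities : List (List String) :=
  [["ctg1", "10", "20", "(A)"], ["ctg1", "30", "40", "(B)"], ["ctg2", "5", "9", "(A)"]]

def Spec_check_for_peculiarities (list_of_features : List (List String)) (out : List String) : Prop := out = check_for_peculiarities_alt list_of_features
instance (list_of_features : List (List String)) (out : List String) : Decidable (Spec_check_for_peculiarities list_of_features out) := by unfold Spec_check_for_peculiarities; infer_instance

-- ===== CLAIM (what is proved, stated in full; the proofs are below) =====
def Claim_equal_check_for_peculiarities : Prop := ∀ (list_of_features : List (List String)), Dom_check_for_peculiarities list_of_features → Pre_check_for_peculiarities list_of_features → Spec_check_for_peculiarities list_of_features (check_for_peculiarities list_of_features)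

-- ===== LEMMAS AND PROOFS =====

-- the first chromosome letter recorded for contig c after processing prefix p
def pvFL (p : List (List String)) (c : String) : Option Char :=
  (p.find? (fun l => pvContig l == c)).map pvLetter

-- Invariant tying A's state (first-letter dict cA, strange set s) to B's state
-- (the list of seen lines = the processed prefix p, the same strange set s):
-- cA is exactly "first letter in p", and c is strange iff some line of p of
-- contig c has a letter different from that first letter.
def pvInv (p : List (List String)) (cA : PySem.Dict String Char) (s : List String) : Prop :=
  (∀ c, cA.get? c = pvFL p c) ∧
  (∀ c, c ∈ s ↔ ∃ l ∈ p, pvContig l = c ∧ pvFL p c ≠ some (pvLetter l))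

lemma pvFL_append_some {p : List (List String)} {c : String} {f : Char} (l : List String)
    (h : pvFL p c = some f) : pvFL (p ++ [l]) c = some f := by
  unfold pvFL at *
  rcases hf : p.find? (fun l => pvContig l == c) with _ | v
  · rw [hf] at h; simp at h
  · rw [List.find?_append, hf]; rw [hf] at h; simpa using h

lemma pvFL_append_none {p : List (List String)} {c : String} (l : List String)
    (h : pvFL p c = none) :
    pvFL (p ++ [l]) c = if pvContig l == c then some (pvLetter l) else none := by
  unfold pvFL at *
  rcases hf : p.find? (fun l => pvContig l == c) with _ | v
  · rw [List.find?_append, hf]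
    simp [List.find?]
    split <;> simp_all
  · rw [hf] at h; simp at h

lemma pvFL_none_iff {p : List (List String)} {c : String} :
    pvFL p c = none ↔ ∀ l ∈ p, pvContig l ≠ c := by
  unfold pvFL
  simp [List.find?_eq_none]

lemma pvFL_append_ne {p : List (List String)} {c : String} {line : List String}
    (h : pvContig line ≠ c) : pvFL (p ++ [line]) c = pvFL p c := by
  rcases hc : pvFL p c with _ | g
  · rw [pvFL_append_none line hc]; simp [h]
  · exact pvFL_append_some line hc

lemma step_inv (line : List String) (p : List (List String))
    (cA : PySem.Dict String Char) (s : List String) (h : pvInv p cA s) :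
    (stepA (cA, s) line).2 = (stepB (p, s) line).2 ∧
      pvInv (p ++ [line]) (stepA (cA, s) line).1 (stepA (cA, s) line).2 := by
  obtain ⟨h1, h2⟩ := h
  rcases hF : pvFL p (pvContig line) with _ | f
  · -- first gene of this contig
    have hget : cA.get? (pvContig line) = none := by rw [h1]; exact hF
    have hcont : cA.contains (pvContig line) = false := by
      rw [PySem.Dict.contains_eq_isSome_get?, hget]; rfl
    have hnoprev : ∀ l ∈ p, pvContig l ≠ pvContig line := pvFL_none_iff.mp hF
    have hany : (p.any (fun prev =>
        pvContig prev == pvContig line && !(pvLetter prev == pvLetter line))) = false := by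
      simp only [List.any_eq_false]
      intro prev hprev; simp [hnoprev prev hprev]
    have hsA : stepA (cA, s) line = (cA.insert (pvContig line) (pvLetter line), s) := by
      simp [stepA, hcont]
    have hsB : stepB (p, s) line = (p ++ [line], s) := by
      simp [stepB, hany]
    rw [hsA, hsB]
    refine ⟨rfl, ?_, ?_⟩
    · intro c
      by_cases hcc : c = pvContig line
      · subst hcc
        rw [PySem.Dict.get?_insert_self, pvFL_append_none line hF]
        simp
      · rw [PySem.Dict.get?_insert_of_ne _ _ hcc, h1,
          pvFL_append_ne (fun e => hcc e.symm)]
    · intro c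
      rw [h2 c]
      by_cases hcc : c = pvContig line
      · subst hcc
        constructor
        · rintro ⟨l, hl, hlc, _⟩; exact absurd hlc (hnoprev l hl)
        · rintro ⟨l, hl, hlc, hne⟩
          rcases List.mem_append.mp hl with hl | hl
          · exact absurd hlc (hnoprev l hl)
          · simp only [List.mem_singleton] at hl
            rw [hl, pvFL_append_none line hF] at hne
            simp at hne
      · have hfl : pvFL (p ++ [line]) c = pvFL p c :=
          pvFL_append_ne (fun e => hcc e.symm)
        constructor
        · rintro ⟨l, hl, hlc, hne⟩
          exact ⟨l, List.mem_append_left _ hl, hlc, by rwa [hfl]⟩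
        · rintro ⟨l, hl, hlc, hne⟩
          rcases List.mem_append.mp hl with hl | hl
          · exact ⟨l, hl, hlc, by rwa [hfl] at hne⟩
          · simp only [List.mem_singleton] at hl; subst hl
            exact absurd hlc.symm hcc
  · -- contig already recorded with first letter f
    have hget : cA.get? (pvContig line) = some f := by rw [h1]; exact hF
    have hcont : cA.contains (pvContig line) = true := by
      rw [PySem.Dict.contains_eq_isSome_get?, hget]; rfl
    have hgd : cA.getD (pvContig line) ' ' = f :=
      PySem.Dict.getD_of_get?_eq_some cA ' ' hget
    have hfl : ∀ c, pvFL (p ++ [line]) c = pvFL p c := by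
      intro c
      by_cases hcc : pvContig line = c
      · rw [← hcc, pvFL_append_some line hF, hF]
      · exact pvFL_append_ne hcc
    have hfind : ∃ lf ∈ p, pvContig lf = pvContig line ∧ pvLetter lf = f := by
      unfold pvFL at hF
      rcases hfw : p.find? (fun l => pvContig l == pvContig line) with _ | lf
      · rw [hfw] at hF; simp at hF
      · rw [hfw] at hF; simp only [Option.map_some, Option.some.injEq] at hF
        exact ⟨lf, List.mem_of_find?_eq_some hfw, by simpa using List.find?_some hfw, hF⟩
    -- the new state of the seen/strange pair, by cases on the letter
    by_cases hx : f = pvLetter line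
    · -- same letter as the first: A skips; B may re-add an already-strange contig
      have hsA : stepA (cA, s) line = (cA, s) := by
        simp [stepA, hcont, hgd, hx]
      have hsB2 : (stepB (p, s) line).2 = s := by
        simp only [stepB]
        rcases hany : p.any (fun prev =>
            pvContig prev == pvContig line && !(pvLetter prev == pvLetter line)) with _ | _
        · simp
        · simp only []
          have : pvContig line ∈ s := by
            rw [List.any_eq_true] at hany
            obtain ⟨prev, hprev, hp⟩ := hany
            simp only [Bool.and_eq_true, beq_iff_eq, Bool.not_eq_true', beq_eq_false_iff_ne] at hp
            exact (h2 (pvContig line)).mpr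
              ⟨prev, hprev, hp.1, by rw [hF]; intro e; exact hp.2 (by
                have := Option.some.inj e; rw [← this, hx])⟩
          simpa using PySem.Set.add_of_mem this
      refine ⟨by rw [hsA, hsB2], ?_, ?_⟩
      · intro c; rw [hsA]; simpa [hfl c] using h1 c
      · intro c
        rw [hsA]
        simp only []
        rw [h2 c]
        constructor
        · rintro ⟨l, hl, hlc, hne⟩
          exact ⟨l, List.mem_append_left _ hl, hlc, by rwa [hfl c]⟩
        · rintro ⟨l, hl, hlc, hne⟩
          rcases List.mem_append.mp hl with hl | hl
          · exact ⟨l, hl, hlc, by rwa [hfl c] at hne⟩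
          · simp only [List.mem_singleton] at hl; subst hl
            rw [hfl c, ← hlc, hF] at hne
            exact absurd (by rw [hx]) hne
    · -- a different letter: both sides mark the contig
      have hne' : (f == pvLetter line) = false := by simpa using hx
      have hsA : stepA (cA, s) line = (cA, PySem.Set.add s (pvContig line)) := by
        simp [stepA, hcont, hgd, hne']
      have hany : (p.any (fun prev =>
          pvContig prev == pvContig line && !(pvLetter prev == pvLetter line))) = true := by
        rw [List.any_eq_true]
        obtain ⟨lf, hlf, hlc, hll⟩ := hfind
        exact ⟨lf, hlf, by simp [hlc, hll, hx]⟩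
      have hsB : stepB (p, s) line = (p ++ [line], PySem.Set.add s (pvContig line)) := by
        simp [stepB, hany]
      rw [hsA, hsB]
      refine ⟨rfl, ?_, ?_⟩
      · intro c; simpa [hfl c] using h1 c
      · intro c
        by_cases hcc : c = pvContig line
        · subst hcc
          constructor
          · intro _
            exact ⟨line, List.mem_append_right _ (List.mem_singleton.mpr rfl), rfl,
              by rw [hfl, hF]; intro e; exact hx (Option.some.inj e)⟩
          · intro _
            exact (PySem.Set.mem_add _ _ _).mpr (Or.inr rfl)
        · have hmem : c ∈ PySem.Set.add s (pvContig line) ↔ c ∈ s := by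
            constructor
            · intro hm
              rcases (PySem.Set.mem_add _ _ _).mp hm with hm | hm
              · exact hm
              · exact absurd hm hcc
            · intro hm; exact (PySem.Set.mem_add _ _ _).mpr (Or.inl hm)
          rw [hmem, h2 c]
          constructor
          · rintro ⟨l, hl, hlc, hne⟩
            exact ⟨l, List.mem_append_left _ hl, hlc, by rwa [hfl c]⟩
          · rintro ⟨l, hl, hlc, hne⟩
            rcases List.mem_append.mp hl with hl | hl
            · exact ⟨l, hl, hlc, by rwa [hfl c] at hne⟩
            · simp only [List.mem_singleton] at hl; subst hl
              exact absurd hlc.symm hcc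

lemma loop_eq (suf p : List (List String)) (cA : PySem.Dict String Char)
    (s : List String) (h : pvInv p cA s) :
    (suf.foldl stepA (cA, s)).2 = (suf.foldl stepB (p, s)).2 := by
  induction suf generalizing p cA s with
  | nil => rfl
  | cons line tl ih =>
    obtain ⟨heq, hinv⟩ := step_inv line p cA s h
    simp only [List.foldl_cons]
    have hA : stepA (cA, s) line = ((stepA (cA, s) line).1, (stepA (cA, s) line).2) := rfl
    have hB : stepB (p, s) line = ((stepB (p, s) line).1, (stepB (p, s) line).2) := rfl
    have hB1 : (stepB (p, s) line).1 = p ++ [line] := rfl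
    rw [hA, hB, ← heq, hB1]
    exact ih (p ++ [line]) (stepA (cA, s) line).1 (stepA (cA, s) line).2 hinv

lemma inv_empty : pvInv [] PySem.Dict.empty PySem.Set.empty := by
  constructor
  · intro c; simp [PySem.Dict.get?_empty, pvFL]
  · intro c; simp [PySem.Set.empty]

-- ===== VERDICT (by name: the statement is the Claim_ definition above) =====
theorem check_for_peculiarities_spec : Claim_equal_check_for_peculiarities := by
  intro l _ _
  unfold Spec_check_for_peculiarities check_for_peculiarities check_for_peculiarities_alt
  exact loop_eq l [] _ _ inv_empty
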